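-- pv_equiv track=rewrite | github.com/HyunjoonKwak/lotto_manager_web | lotto_dashboard/app/utils/recommend.py | _reason_for_combo
-- ===== SOURCE A (Python) =====
-- from typing import List, Set, Tuple, Dict
-- from collections import Counter, defaultdict
--
-- def _reason_for_combo(combo: List[int], freq: Counter, pair_map: Dict[Tuple[int,int],int]) -> str:
--     arr = sorted(combo)
--     top3 = sorted(arr, key=lambda n: (-freq.get(n,0), n))[:3]
--     pair_hits = []
--     for i in range(6):
--         for j in range(i+1,6):
--             a,b = arr[i],arr[j]
--             pair_hits.append(pair_map.get((a,b)) or pair_map.get((b,a), 0))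
--     pair_hits.sort(reverse=True)
--     pair_top = pair_hits[:2] if pair_hits else []
--     even = sum(1 for x in arr if x%2==0)
--     odd = 6-even
--     parts = []
--     if top3:
--         parts.append(f"상대적 빈출 {', '.join(map(str,top3))}")
--     if pair_top and sum(pair_top) > 0:
--         parts.append(f"페어 시너지(상위): {sum(pair_top)}")
--     parts.append(f"홀짝밸런스 {odd}:{even}")
--     return " / ".join(parts)
-- ===== SOURCE B (Python) =====
-- # B: instead of building/sorting/slicing full lists, maintain bounded "top-k" sorted buffers
-- # (top-3 by frequency key, top-2 pair hits) by truncated insertion during a single pass.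
-- def _reason_for_combo(combo, freq, pair_map):
--     arr = sorted(combo)
--     key = lambda n: (-freq.get(n, 0), n)
--     top3 = []
--     for n in arr:
--         i = 0
--         while i < len(top3) and key(top3[i]) <= key(n):
--             i += 1
--         top3.insert(i, n)
--         del top3[3:]
--     best = []
--     for i in range(6):
--         for j in range(i + 1, 6):
--             a, b = arr[i], arr[j]
--             h = pair_map.get((a, b)) or pair_map.get((b, a), 0)
--             t = 0
--             while t < len(best) and best[t] >= h:
--                 t += 1
--             best.insert(t, h)
--             del best[2:]
--     even = sum(1 for x in arr if x % 2 == 0)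
--     odd = 6 - even
--     parts = []
--     if top3:
--         parts.append(f"상대적 빈출 {', '.join(map(str, top3))}")
--     if best and sum(best) > 0:
--         parts.append(f"페어 시너지(상위): {sum(best)}")
--     parts.append(f"홀짝밸런스 {odd}:{even}")
--     return " / ".join(parts)
-- ===== Notes on version B (the rewrite author's own statement) =====
-- stated objective: alternative
-- what changed: Instead of sorting the whole candidate list by the frequency key and slicing [:3], and building all 15 pair hits, sorting them descending and slicing [:2], B maintains bounded sorted top-3 / top-2 buffers by truncated insertion while passing over the data once.
import Mathlib
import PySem

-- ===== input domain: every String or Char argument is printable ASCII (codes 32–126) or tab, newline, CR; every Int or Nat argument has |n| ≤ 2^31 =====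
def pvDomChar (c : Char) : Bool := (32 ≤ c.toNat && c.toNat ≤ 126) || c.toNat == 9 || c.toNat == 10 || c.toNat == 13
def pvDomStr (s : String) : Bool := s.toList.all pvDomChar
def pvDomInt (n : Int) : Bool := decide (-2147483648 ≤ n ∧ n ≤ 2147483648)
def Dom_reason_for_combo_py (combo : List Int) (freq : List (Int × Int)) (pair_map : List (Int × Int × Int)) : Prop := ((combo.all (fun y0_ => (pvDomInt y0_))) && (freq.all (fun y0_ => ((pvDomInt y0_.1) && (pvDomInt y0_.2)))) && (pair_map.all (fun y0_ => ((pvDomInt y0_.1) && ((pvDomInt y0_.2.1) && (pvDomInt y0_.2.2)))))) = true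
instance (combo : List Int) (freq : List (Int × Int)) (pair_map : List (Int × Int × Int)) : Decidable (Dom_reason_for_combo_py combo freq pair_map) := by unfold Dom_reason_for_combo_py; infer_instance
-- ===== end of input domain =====

-- B maintains bounded sorted top-3 / top-2 buffers by truncated insertion instead of
-- sorting the full lists and slicing (same return value; no side effects observable).

-- ===== PORT A =====

-- pair_map.get((a,b)): dict lookup keyed by the tuple (a,b); association list, first match
def pvPmGet? : List (Int × Int × Int) → Int → Int → Option Int
  | [], _, _ => none
  | (x, y, v) :: t, a, b => if x = a ∧ y = b then some v else pvPmGet? t a b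

-- `pair_map.get((a, b)) or pair_map.get((b, a), 0)` — Python `or` treats both None and 0 as falsy
def pvPairHit (pair_map : List (Int × Int × Int)) (a b : Int) : Int :=
  match pvPmGet? pair_map a b with
  | some v => if v = 0 then (pvPmGet? pair_map b a).getD 0 else v
  | none => (pvPmGet? pair_map b a).getD 0

def reason_for_combo_py (combo : List Int) (freq : List (Int × Int)) (pair_map : List (Int × Int × Int)) : String :=
  let arr := PySem.List.sorted combo (fun x => x) false
  -- sorted(arr, key=lambda n: (-freq.get(n,0), n))[:3]
  let top3 := (PySem.List.sorted2 arr (fun n => -(PySem.Dict.getD (PySem.Dict.mk freq) n 0)) (fun n => n) false).take 3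
  -- nested loop appending each pair hit; arr[i] in range for 6 ≤ len(combo) (Pre_), getD 0 otherwise
  let pair_hits := (PySem.List.pyRange 0 6 1).foldl (fun acc i =>
      (PySem.List.pyRange (i + 1) 6 1).foldl (fun acc j =>
        acc ++ [pvPairHit pair_map (PySem.List.pyGetD arr i 0) (PySem.List.pyGetD arr j 0)]) acc) []
  -- pair_hits.sort(reverse=True); pair_top = pair_hits[:2] if pair_hits else []  ([:2] = take 2)
  let sortedHits := PySem.List.sorted pair_hits (fun x => x) true
  let pair_top := if sortedHits ≠ [] then sortedHits.take 2 else ([] : List Int)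
  let even := arr.foldl (fun acc x => if PySem.Int.mod x 2 = 0 then acc + 1 else acc) (0 : Int)
  let odd := 6 - even
  let parts : List String := []
  let parts := if top3 ≠ [] then parts ++ ["상대적 빈출 " ++ PySem.Str.join ", " (top3.map PySem.Int.toStr)] else parts
  let parts := if pair_top ≠ [] ∧ 0 < pair_top.sum then parts ++ ["페어 시너지(상위): " ++ PySem.Int.toStr pair_top.sum] else parts
  let parts := parts ++ ["홀짝밸런스 " ++ PySem.Int.toStr odd ++ ":" ++ PySem.Int.toStr even]
  PySem.Str.join " / " parts

-- ===== PORT B =====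

-- key(y) <= key(n) for key = lambda m: (-freq.get(m,0), m), tuple order = lexicographic
def pvKeyLE (freq : List (Int × Int)) (y n : Int) : Bool :=
  decide (-(PySem.Dict.getD (PySem.Dict.mk freq) y 0) < -(PySem.Dict.getD (PySem.Dict.mk freq) n 0) ∨
          (-(PySem.Dict.getD (PySem.Dict.mk freq) y 0) = -(PySem.Dict.getD (PySem.Dict.mk freq) n 0) ∧ y ≤ n))

-- the `while … key(top3[i]) <= key(n)` scan + `top3.insert(i, n)`
def pvInsKey (freq : List (Int × Int)) (n : Int) : List Int → List Int
  | [] => [n]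
  | y :: ys => if pvKeyLE freq y n then y :: pvInsKey freq n ys else n :: y :: ys

-- the `while … best[t] >= h` scan + `best.insert(t, h)` (descending buffer)
def pvInsDesc (h : Int) : List Int → List Int
  | [] => [h]
  | y :: ys => if h ≤ y then y :: pvInsDesc h ys else h :: y :: ys

def reason_for_combo_py_alt (combo : List Int) (freq : List (Int × Int)) (pair_map : List (Int × Int × Int)) : String :=
  let arr := PySem.List.sorted combo (fun x => x) false
  -- one pass: insert into top3, `del top3[3:]` = take 3
  let top3 := arr.foldl (fun acc n => (pvInsKey freq n acc).take 3) []
  -- nested pair loop folding each hit into the top-2 buffer, `del best[2:]` = take 2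
  let best := (PySem.List.pyRange 0 6 1).foldl (fun acc i =>
      (PySem.List.pyRange (i + 1) 6 1).foldl (fun acc j =>
        (pvInsDesc (pvPairHit pair_map (PySem.List.pyGetD arr i 0) (PySem.List.pyGetD arr j 0)) acc).take 2) acc) []
  let even := arr.foldl (fun acc x => if PySem.Int.mod x 2 = 0 then acc + 1 else acc) (0 : Int)
  let odd := 6 - even
  let parts : List String := []
  let parts := if top3 ≠ [] then parts ++ ["상대적 빈출 " ++ PySem.Str.join ", " (top3.map PySem.Int.toStr)] else parts
  let parts := if best ≠ [] ∧ 0 < best.sum then parts ++ ["페어 시너지(상위): " ++ PySem.Int.toStr best.sum] else parts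
  let parts := parts ++ ["홀짝밸런스 " ++ PySem.Int.toStr odd ++ ":" ++ PySem.Int.toStr even]
  PySem.Str.join " / " parts

-- ===== PRECONDITION & SPEC =====
-- A indexes arr[0]..arr[5]: it raises IndexError exactly when len(combo) < 6.
def Pre_reason_for_combo_py (combo : List Int) (freq : List (Int × Int)) (pair_map : List (Int × Int × Int)) : Prop := 6 ≤ combo.length
instance (combo : List Int) (freq : List (Int × Int)) (pair_map : List (Int × Int × Int)) : Decidable (Pre_reason_for_combo_py combo freq pair_map) := by unfold Pre_reason_for_combo_py; infer_instance
def pvWitness_reason_for_combo_py : List Int × (List (Int × Int)) × (List (Int × Int × Int)) := ([1, 2, 3, 4, 5, 6], [(3, 2)], [(1, 2, 4)])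

def Spec_reason_for_combo_py (combo : List Int) (freq : List (Int × Int)) (pair_map : List (Int × Int × Int)) (out : String) : Prop := out = reason_for_combo_py_alt combo freq pair_map
instance (combo : List Int) (freq : List (Int × Int)) (pair_map : List (Int × Int × Int)) (out : String) : Decidable (Spec_reason_for_combo_py combo freq pair_map out) := by unfold Spec_reason_for_combo_py; infer_instance

-- ===== CLAIM (what is proved, stated in full; the proofs are below) =====
def Claim_equal_reason_for_combo_py : Prop := ∀ (combo : List Int) (freq : List (Int × Int)) (pair_map : List (Int × Int × Int)), Dom_reason_for_combo_py combo freq pair_map → Pre_reason_for_combo_py combo freq pair_map → Spec_reason_for_combo_py combo freq pair_map (reason_for_combo_py combo freq pair_map)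

-- ===== LEMMAS AND PROOFS =====

-- truncating the buffer to k before inserting does not change the first k entries
theorem pv_take_insertBy (bef : Int → Int → Bool) (x : Int) :
    ∀ (k : Nat) (s : List Int),
      (PySem.List.insertBy bef x (s.take k)).take k = (PySem.List.insertBy bef x s).take k := by
  intro k s
  induction s generalizing k with
  | nil => simp
  | cons y ys ih =>
    cases k with
    | zero => simp
    | succ n =>
      rw [List.take_succ_cons]
      simp only [PySem.List.insertBy]
      by_cases h : bef x y = true
      · rw [if_pos h, if_pos h]
        cases n with
        | zero => simp
        | succ m => simp [List.take_take]
      · rw [if_neg h, if_neg h, List.take_succ_cons, List.take_succ_cons, ih n]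

-- a fold of truncated insertions equals the truncation of the full insertion fold
theorem pv_trunc_foldl (bef : Int → Int → Bool) (k : Nat) :
    ∀ (l s : List Int),
      l.foldl (fun acc x => (PySem.List.insertBy bef x acc).take k) (s.take k)
        = (l.foldl (fun acc x => PySem.List.insertBy bef x acc) s).take k := by
  intro l
  induction l with
  | nil => intro s; rfl
  | cons x l ih =>
    intro s
    simp only [List.foldl_cons, pv_take_insertBy bef x k s, ih (PySem.List.insertBy bef x s)]

-- B's hand-written scan-insert is insertBy with sorted2's lexicographic comparator
theorem pvInsKey_eq (freq : List (Int × Int)) (n : Int) (l : List Int) :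
    pvInsKey freq n l
      = PySem.List.insertBy (fun a b =>
          decide (-(PySem.Dict.getD (PySem.Dict.mk freq) a 0) < -(PySem.Dict.getD (PySem.Dict.mk freq) b 0)) ||
          (!decide (-(PySem.Dict.getD (PySem.Dict.mk freq) b 0) < -(PySem.Dict.getD (PySem.Dict.mk freq) a 0)) && decide (a < b))) n l := by
  induction l with
  | nil => rfl
  | cons y ys ih =>
    have key : (decide (-(PySem.Dict.getD (PySem.Dict.mk freq) n 0) < -(PySem.Dict.getD (PySem.Dict.mk freq) y 0)) ||
          (!decide (-(PySem.Dict.getD (PySem.Dict.mk freq) y 0) < -(PySem.Dict.getD (PySem.Dict.mk freq) n 0)) && decide (n < y)))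
        = !(pvKeyLE freq y n) := by
      simp only [pvKeyLE]
      by_cases h1 : -(PySem.Dict.getD (PySem.Dict.mk freq) n 0) < -(PySem.Dict.getD (PySem.Dict.mk freq) y 0) <;>
      by_cases h2 : -(PySem.Dict.getD (PySem.Dict.mk freq) y 0) < -(PySem.Dict.getD (PySem.Dict.mk freq) n 0) <;>
      by_cases h3 : n < y <;>
      simp only [h1, h2, h3, decide_true, decide_false] <;> simp <;> omega
    simp only [pvInsKey, PySem.List.insertBy, key, ih]
    cases hk : pvKeyLE freq y n <;> simp_all

-- B's hand-written descending scan-insert is insertBy with the reverse-sort comparator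
theorem pvInsDesc_eq (h : Int) (l : List Int) :
    pvInsDesc h l = PySem.List.insertBy (fun a b => decide (b < a)) h l := by
  induction l with
  | nil => rfl
  | cons y ys ih =>
    simp only [pvInsDesc, PySem.List.insertBy, ih]
    by_cases hy : y < h
    · simp [hy, not_le.mpr hy]
    · simp [hy, not_lt.mp hy]

-- both nested pair loops are folds over the same flattened hit list
theorem pv_nested_foldl (g : List Int → Int → List Int) (h : Int → Int → Int) (init : List Int) :
    (PySem.List.pyRange 0 6 1).foldl (fun acc i =>
        (PySem.List.pyRange (i + 1) 6 1).foldl (fun acc j => g acc (h i j)) acc) init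
      = ((PySem.List.pyRange 0 6 1).flatMap (fun i =>
          (PySem.List.pyRange (i + 1) 6 1).map (h i))).foldl g init := by
  simp [List.foldl_flatMap, List.foldl_map]

-- B's one-pass truncated insertion equals A's full key-sort sliced to 3
theorem pv_top3_eq (freq : List (Int × Int)) (arr : List Int) :
    arr.foldl (fun acc n => (pvInsKey freq n acc).take 3) []
      = (PySem.List.sorted2 arr (fun n => -(PySem.Dict.getD (PySem.Dict.mk freq) n 0)) (fun n => n) false).take 3 := by
  have h2 : PySem.List.sorted2 arr (fun n => -(PySem.Dict.getD (PySem.Dict.mk freq) n 0)) (fun n => n) false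
      = arr.foldl (fun acc x => PySem.List.insertBy (fun a b =>
          decide (-(PySem.Dict.getD (PySem.Dict.mk freq) a 0) < -(PySem.Dict.getD (PySem.Dict.mk freq) b 0)) ||
          (!decide (-(PySem.Dict.getD (PySem.Dict.mk freq) b 0) < -(PySem.Dict.getD (PySem.Dict.mk freq) a 0)) && decide (a < b))) x acc) [] := rfl
  rw [h2]
  simp only [pvInsKey_eq]
  have h3 := pv_trunc_foldl (fun a b =>
          decide (-(PySem.Dict.getD (PySem.Dict.mk freq) a 0) < -(PySem.Dict.getD (PySem.Dict.mk freq) b 0)) ||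
          (!decide (-(PySem.Dict.getD (PySem.Dict.mk freq) b 0) < -(PySem.Dict.getD (PySem.Dict.mk freq) a 0)) && decide (a < b))) 3 arr []
  simpa using h3

-- B's truncated top-2 buffer over the pair loop equals A's reverse sort of all hits sliced to 2
theorem pv_best_eq (pair_map : List (Int × Int × Int)) (arr : List Int) :
    (PySem.List.pyRange 0 6 1).foldl (fun acc i =>
        (PySem.List.pyRange (i + 1) 6 1).foldl (fun acc j =>
          (pvInsDesc (pvPairHit pair_map (PySem.List.pyGetD arr i 0) (PySem.List.pyGetD arr j 0)) acc).take 2) acc) []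
      = (PySem.List.sorted ((PySem.List.pyRange 0 6 1).foldl (fun acc i =>
          (PySem.List.pyRange (i + 1) 6 1).foldl (fun acc j =>
            acc ++ [pvPairHit pair_map (PySem.List.pyGetD arr i 0) (PySem.List.pyGetD arr j 0)]) acc) []) (fun x => x) true).take 2 := by
  have hh : (PySem.List.pyRange 0 6 1).foldl (fun acc i =>
        (PySem.List.pyRange (i + 1) 6 1).foldl (fun acc j =>
          acc ++ [pvPairHit pair_map (PySem.List.pyGetD arr i 0) (PySem.List.pyGetD arr j 0)]) acc) []
      = ((PySem.List.pyRange 0 6 1).flatMap (fun i =>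
          (PySem.List.pyRange (i + 1) 6 1).map (fun j => pvPairHit pair_map (PySem.List.pyGetD arr i 0) (PySem.List.pyGetD arr j 0)))) := by
    have h1 := pv_nested_foldl (fun acc v => acc ++ [v])
      (fun i j => pvPairHit pair_map (PySem.List.pyGetD arr i 0) (PySem.List.pyGetD arr j 0)) []
    simpa [PySem.List.foldl_append_singleton_eq_self] using h1
  rw [hh]
  have hb := pv_nested_foldl (fun acc h => (pvInsDesc h acc).take 2)
    (fun i j => pvPairHit pair_map (PySem.List.pyGetD arr i 0) (PySem.List.pyGetD arr j 0)) []
  rw [show (fun (acc : List Int) (i : Int) =>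
        (PySem.List.pyRange (i + 1) 6 1).foldl (fun acc j =>
          (pvInsDesc (pvPairHit pair_map (PySem.List.pyGetD arr i 0) (PySem.List.pyGetD arr j 0)) acc).take 2) acc)
      = (fun (acc : List Int) (i : Int) =>
        (PySem.List.pyRange (i + 1) 6 1).foldl (fun acc j =>
          (fun acc h => (pvInsDesc h acc).take 2) acc ((fun i j => pvPairHit pair_map (PySem.List.pyGetD arr i 0) (PySem.List.pyGetD arr j 0)) i j)) acc) from rfl,
    hb, PySem.List.sorted_rev_eq_foldl_insertBy]
  simp only [pvInsDesc_eq]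
  have h3 := pv_trunc_foldl (fun a b => decide (b < a)) 2
    ((PySem.List.pyRange 0 6 1).flatMap (fun i =>
      (PySem.List.pyRange (i + 1) 6 1).map (fun j => pvPairHit pair_map (PySem.List.pyGetD arr i 0) (PySem.List.pyGetD arr j 0)))) []
  simpa using h3

-- A's guard `pair_top = pair_hits[:2] if pair_hits else []` collapses: take 2 of [] is []
theorem pv_pairtop_collapse (l : List Int) : (if l ≠ [] then l.take 2 else []) = l.take 2 := by
  cases l <;> simp

-- ===== VERDICT (by name: the statement is the Claim_ definition above) =====
theorem reason_for_combo_py_spec : Claim_equal_reason_for_combo_py := by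
  intro combo freq pair_map _ _
  unfold Spec_reason_for_combo_py reason_for_combo_py reason_for_combo_py_alt
  simp only [pv_pairtop_collapse, pv_top3_eq, pv_best_eq]
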